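-- pv_equiv track=rewrite | github.com/johnesteban/ST0245-002 | laboratorios/lab03/codigo/pivote.py | Pivote
-- ===== SOURCE A (Python) =====
-- def SumArray(arreglo):
--     total=0 #C1
--     for i in range(len(arreglo)): #C2*n
--         total+=arreglo[i] #C3*n
--     return total  #C4
--
-- def Pivote(arreglo):
--     ladoDerecho=0 #C1
--     ladoIzquierdo=0 #C2
--     arregloNuevo=[0]*len(arreglo) #C3
--     suma=0 #C4
--     for i in range(len(arreglo)): #C5*n donde n es la longitud del arreglo
--         arregloNuevo[i]=arreglo[i]+suma #C6*n
--         suma+=arreglo[i] #C7*n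
--     minimo=SumArray(arreglo) #C8*n, la complejidad del metodo sumArray es O(n)
--     for i in range(1,len(arreglo)):#C9*(n-1)
--         ladoIzquierdo=arregloNuevo[i-1]#C10*(n-1)
--         ladoDerecho=arregloNuevo[len(arregloNuevo)-1]-arregloNuevo[i]#C11*(n-1)
--         diferencia=abs(ladoIzquierdo-ladoDerecho)#C12*(n-1)
--         if(diferencia<minimo): #C13*(n-1)
--             minimo=diferencia #C14*(n-1)
--             posicionPivote=i #C15*(n-1)
--     return posicionPivote #C16
-- ===== SOURCE B (Python) =====
-- def Pivote(arreglo):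
--     total = sum(arreglo)
--     minimo = total
--     ladoIzquierdo = 0
--     for i in range(1, len(arreglo)):
--         ladoIzquierdo += arreglo[i - 1]
--         ladoDerecho = total - ladoIzquierdo - arreglo[i]
--         diferencia = abs(ladoIzquierdo - ladoDerecho)
--         if diferencia < minimo:
--             minimo = diferencia
--             posicionPivote = i
--     return posicionPivote
-- ===== Notes on version B (the rewrite author's own statement) =====
-- stated objective: simpler
-- what changed: Replaces the precomputed prefix-sum array and the SumArray helper with a single total computed by sum() and a running left-sum accumulator updated inside the one scanning loop.
import Mathlib
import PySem

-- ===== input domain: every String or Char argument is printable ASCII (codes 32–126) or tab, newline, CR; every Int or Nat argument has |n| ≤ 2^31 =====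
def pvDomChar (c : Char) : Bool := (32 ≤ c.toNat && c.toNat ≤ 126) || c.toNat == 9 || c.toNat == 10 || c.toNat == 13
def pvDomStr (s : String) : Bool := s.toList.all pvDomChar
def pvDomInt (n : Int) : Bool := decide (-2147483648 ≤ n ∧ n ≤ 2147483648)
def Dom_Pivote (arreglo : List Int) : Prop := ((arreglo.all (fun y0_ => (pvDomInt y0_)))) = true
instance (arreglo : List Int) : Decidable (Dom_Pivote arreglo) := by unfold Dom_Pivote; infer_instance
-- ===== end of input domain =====

-- B replaces A's prefix-sum array and SumArray helper by one total and a running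
-- left-sum accumulator inside the single scanning loop (simpler, O(1) extra space).

-- ===== PORT A =====
def SumArrayA (arreglo : List Int) : Int :=
  (PySem.List.pyRange 0 (arreglo.length : Int) 1).foldl
    (fun total i => total + PySem.List.pyGetD arreglo i 0) 0

-- the first loop of A: fills arregloNuevo[i] = arreglo[i] + suma, suma += arreglo[i],
-- written as the obvious structural recursion carrying the same running state `suma`
def buildNuevo (arreglo : List Int) (suma : Int) : List Int :=
  match arreglo with
  | [] => []
  | a :: t => (a + suma) :: buildNuevo t (a + suma)

def pivLoopA (arregloNuevo : List Int) (st : Int × Option Int) (i : Int) : Int × Option Int :=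
  let ladoIzquierdo := PySem.List.pyGetD arregloNuevo (i - 1) 0
  let ladoDerecho := PySem.List.pyGetD arregloNuevo ((arregloNuevo.length : Int) - 1) 0
                     - PySem.List.pyGetD arregloNuevo i 0
  let diferencia := |ladoIzquierdo - ladoDerecho|
  if diferencia < st.1 then (diferencia, some i) else st

def Pivote (arreglo : List Int) : Int :=
  let arregloNuevo := buildNuevo arreglo 0
  let minimo := SumArrayA arreglo
  let r := (PySem.List.pyRange 1 (arreglo.length : Int) 1).foldl
    (pivLoopA arregloNuevo) (minimo, none)
  r.2.getD 0   -- `none` only outside Pre_Pivote (where the Python raises UnboundLocalError)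

-- ===== PORT B =====
def pivLoopB (arreglo : List Int) (total : Int) (st : Int × Int × Option Int) (i : Int) :
    Int × Int × Option Int :=
  let ladoIzquierdo := st.1 + PySem.List.pyGetD arreglo (i - 1) 0
  let ladoDerecho := total - ladoIzquierdo - PySem.List.pyGetD arreglo i 0
  let diferencia := |ladoIzquierdo - ladoDerecho|
  if diferencia < st.2.1 then (ladoIzquierdo, diferencia, some i)
  else (ladoIzquierdo, st.2.1, st.2.2)

def Pivote_alt (arreglo : List Int) : Int :=
  let total := arreglo.foldl (· + ·) 0
  let r := (PySem.List.pyRange 1 (arreglo.length : Int) 1).foldl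
    (pivLoopB arreglo total) (0, total, none)
  r.2.2.getD 0   -- `none` only outside Pre_Pivote (where the Python raises UnboundLocalError)

-- ===== PRECONDITION & SPEC =====
-- Pre_ excludes exactly the inputs on which both Pythons raise UnboundLocalError
-- (posicionPivote never assigned): length ≤ 1, or no split difference beats the total sum.
def Pre_Pivote (arreglo : List Int) : Prop :=
  ∃ i < arreglo.length, 1 ≤ i ∧
    |(arreglo.take i).sum - (arreglo.drop (i + 1)).sum| < arreglo.sum
instance (arreglo : List Int) : Decidable (Pre_Pivote arreglo) := by
  unfold Pre_Pivote; infer_instance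

def pvWitness_Pivote : List Int := [1, 1]

def Spec_Pivote (arreglo : List Int) (out : Int) : Prop := out = Pivote_alt arreglo
instance (arreglo : List Int) (out : Int) : Decidable (Spec_Pivote arreglo out) := by
  unfold Spec_Pivote; infer_instance

-- ===== CLAIM (what is proved, stated in full; the proofs are below) =====
def Claim_equal_Pivote : Prop :=
  ∀ (arreglo : List Int), Dom_Pivote arreglo → Pre_Pivote arreglo →
    Spec_Pivote arreglo (Pivote arreglo)

-- ===== LEMMAS AND PROOFS =====

theorem buildNuevo_length (l : List Int) (s : Int) : (buildNuevo l s).length = l.length := by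
  induction l generalizing s with
  | nil => rfl
  | cons a t ih => simp [buildNuevo, ih]

theorem buildNuevo_getElem (l : List Int) (s : Int) (j : Nat) (h : j < l.length) :
    (buildNuevo l s)[j]'(by rw [buildNuevo_length]; exact h) = s + (l.take (j + 1)).sum := by
  induction l generalizing s j with
  | nil => simp at h
  | cons a t ih =>
    cases j with
    | zero => simp [buildNuevo]; ring
    | succ j =>
      simp only [buildNuevo, List.getElem_cons_succ, List.take_succ_cons, List.sum_cons]
      rw [ih (a + s) j (by simpa using h)]
      ring

theorem buildNuevo_pyGetD (l : List Int) (j : Int) (h0 : 0 ≤ j) (h1 : j < (l.length : Int)) :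
    PySem.List.pyGetD (buildNuevo l 0) j 0 = (l.take (j.toNat + 1)).sum := by
  have hj : j.toNat < (buildNuevo l 0).length := by rw [buildNuevo_length]; omega
  conv_lhs => rw [show j = (j.toNat : Int) by omega]
  rw [PySem.List.pyGetD_natCast, List.getD_eq_getElem _ _ hj,
    buildNuevo_getElem l 0 j.toNat (by rw [← buildNuevo_length l 0]; exact hj)]
  ring

theorem sumArrayA_eq (l : List Int) : SumArrayA l = l.sum := by
  unfold SumArrayA
  rw [PySem.List.foldl_pyRange_zero_pyGetD' l 0 (fun t x => t + x) 0]
  exact (List.sum_eq_foldl).symm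

-- the two scanning loops agree: B's first component tracks A's prefix-sum-array lookup
theorem loop_eq (arreglo : List Int) (k : Int) (hk : 1 ≤ k) (m : Int) (p : Option Int) :
    ((PySem.List.pyRange k (arreglo.length : Int) 1).foldl
        (pivLoopB arreglo arreglo.sum) ((arreglo.take (k - 1).toNat).sum, m, p)).2
    = (PySem.List.pyRange k (arreglo.length : Int) 1).foldl
        (pivLoopA (buildNuevo arreglo 0)) (m, p) := by
  by_cases hlt : k < (arreglo.length : Int)
  · rw [PySem.List.pyRange_one_cons hlt]
    simp only [List.foldl_cons]
    have hklen : k.toNat < arreglo.length := by omega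
    have hble : ((buildNuevo arreglo 0).length : Int) = (arreglo.length : Int) := by
      rw [buildNuevo_length]
    -- element access facts
    have ha : PySem.List.pyGetD arreglo (k - 1) 0 = arreglo.getD (k - 1).toNat 0 := by
      conv_lhs => rw [show k - 1 = (((k - 1).toNat : Nat) : Int) by omega]
      exact PySem.List.pyGetD_natCast _ _ _
    have hb : PySem.List.pyGetD arreglo k 0 = arreglo.getD k.toNat 0 := by
      conv_lhs => rw [show k = ((k.toNat : Nat) : Int) by omega]
      exact PySem.List.pyGetD_natCast _ _ _
    have hS1 : (arreglo.take (k - 1).toNat).sum + arreglo.getD (k - 1).toNat 0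
        = (arreglo.take k.toNat).sum := by
      rw [List.getD_eq_getElem _ _ (by omega), show k.toNat = (k - 1).toNat + 1 by omega,
        List.sum_take_succ _ _ (by omega)]
    have hS2 : (arreglo.take (k.toNat + 1)).sum
        = (arreglo.take k.toNat).sum + arreglo.getD k.toNat 0 := by
      rw [List.getD_eq_getElem _ _ hklen, List.sum_take_succ _ _ hklen]
    -- A's prefix-array lookups as prefix sums
    have hA1 : PySem.List.pyGetD (buildNuevo arreglo 0) (k - 1) 0
        = (arreglo.take k.toNat).sum := by
      rw [buildNuevo_pyGetD arreglo (k - 1) (by omega) (by omega)]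
      congr 2; omega
    have hA2 : PySem.List.pyGetD (buildNuevo arreglo 0)
          (((buildNuevo arreglo 0).length : Int) - 1) 0 = arreglo.sum := by
      rw [hble, buildNuevo_pyGetD arreglo _ (by omega) (by omega),
        show ((arreglo.length : Int) - 1).toNat + 1 = arreglo.length by omega,
        List.take_length]
    have hA3 : PySem.List.pyGetD (buildNuevo arreglo 0) k 0
        = (arreglo.take (k.toNat + 1)).sum := by
      rw [buildNuevo_pyGetD arreglo k (by omega) hlt]
    -- one step of each loop produces the same pair, and B's accumulator advances to take k
    have hstep : pivLoopB arreglo arreglo.sum ((arreglo.take (k - 1).toNat).sum, m, p) k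
        = ((arreglo.take ((k + 1) - 1).toNat).sum,
           pivLoopA (buildNuevo arreglo 0) (m, p) k) := by
      simp only [pivLoopB, pivLoopA, ha, hb, hA1, hA2, hA3, hS1, hS2]
      have hkk : ((k + 1) - 1).toNat = k.toNat := by omega
      have hder : arreglo.sum - (arreglo.take k.toNat).sum - arreglo.getD k.toNat 0
          = arreglo.sum - ((arreglo.take k.toNat).sum + arreglo.getD k.toNat 0) := by ring
      rw [hder]
      split <;> rw [hkk]
    rw [hstep]
    exact loop_eq arreglo (k + 1) (by omega) _ _
  · rw [PySem.List.pyRange_one_eq_nil (by omega)]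
    simp
termination_by ((arreglo.length : Int) - k).toNat
decreasing_by omega

-- ===== VERDICT (by name: the statement is the Claim_ definition above) =====
theorem Pivote_spec : Claim_equal_Pivote := by
  intro arreglo _ _
  unfold Spec_Pivote
  simp only [Pivote, Pivote_alt]
  have htot : List.foldl (· + ·) (0 : Int) arreglo = arreglo.sum := (List.sum_eq_foldl).symm
  have h := loop_eq arreglo 1 le_rfl arreglo.sum none
  simp only [show ((1 : Int) - 1).toNat = 0 by omega, List.take_zero, List.sum_nil] at h
  rw [htot, sumArrayA_eq, ← h]
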